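-- pv_equiv track=rewrite | github.com/Arsen1302/Code-copy-detector | TestData/solutions/problem_1374_4.py | solution_1374_4
-- ===== SOURCE A (Python) =====
-- from typing import List
--
-- def solution_1374_4(operations: List[str]) -> int:
--     x=0
--     for i in operations:
--         if(i=="X--" or i=="--X"):
--             x-=1
--         else:
--             x+=1
--     return x
-- ===== SOURCE B (Python) =====
-- from typing import List
--
-- def solution_1374_4(operations: List[str]) -> int:
--     freq = {}
--     for op in operations:
--         freq[op] = freq.get(op, 0) + 1
--     total = 0
--     for op, c in freq.items():
--         total += -c if op in ("X--", "--X") else c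
--     return total
-- ===== Notes on version B (the rewrite author's own statement) =====
-- stated objective: alternative
-- what changed: B first groups the operations into a frequency dictionary (one counting pass over the list) and then sums signed counts over the distinct operation strings, instead of A's per-element +/-1 running accumulator.
import Mathlib
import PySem

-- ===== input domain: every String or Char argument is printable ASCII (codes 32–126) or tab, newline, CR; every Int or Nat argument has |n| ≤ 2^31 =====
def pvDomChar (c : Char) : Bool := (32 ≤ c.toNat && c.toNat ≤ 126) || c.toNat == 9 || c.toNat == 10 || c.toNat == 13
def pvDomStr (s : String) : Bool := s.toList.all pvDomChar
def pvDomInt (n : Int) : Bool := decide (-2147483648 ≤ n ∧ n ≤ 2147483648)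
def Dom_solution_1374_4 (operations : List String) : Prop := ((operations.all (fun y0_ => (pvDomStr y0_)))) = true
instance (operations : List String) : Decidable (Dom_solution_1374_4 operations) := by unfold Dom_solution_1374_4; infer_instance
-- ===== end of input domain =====

-- B groups the operations into a frequency dictionary and sums signed counts over distinct keys, instead of A's per-element +/-1 accumulator (alternative decomposition, same cost).

-- ===== PORT A =====
def solution_1374_4 (operations : List String) : Int :=
  operations.foldl (fun x i => if i == "X--" || i == "--X" then x - 1 else x + 1) 0

-- ===== PORT B =====
def solution_1374_4_alt (operations : List String) : Int :=
  let freq : PySem.Dict String Int :=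
    operations.foldl (fun d op => d.insert op (d.getD op 0 + 1)) PySem.Dict.empty
  freq.items.foldl (fun total p =>
    total + (if p.1 == "X--" || p.1 == "--X" then -p.2 else p.2)) 0

-- ===== PRECONDITION & SPEC =====
def Spec_solution_1374_4 (operations : List String) (out : Int) : Prop := out = solution_1374_4_alt operations
instance (operations : List String) (out : Int) : Decidable (Spec_solution_1374_4 operations out) := by unfold Spec_solution_1374_4; infer_instance

-- ===== CLAIM (what is proved, stated in full; the proofs are below) =====
def Claim_equal_solution_1374_4 : Prop := ∀ (operations : List String), Dom_solution_1374_4 operations → Spec_solution_1374_4 operations (solution_1374_4 operations)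

-- ===== LEMMAS AND PROOFS =====

-- A's running accumulator, shifted start
lemma foldA_shift (l : List String) (x : Int) :
    l.foldl (fun x i => if i == "X--" || i == "--X" then x - 1 else x + 1) x
      = x + l.foldl (fun x i => if i == "X--" || i == "--X" then x - 1 else x + 1) 0 := by
  induction l generalizing x with
  | nil => simp
  | cons h t ih =>
    simp only [List.foldl_cons]
    by_cases hh : (h == "X--" || h == "--X") = true
    · rw [if_pos hh, if_pos hh, ih (x-1), ih (0-1)]; ring
    · rw [if_neg hh, if_neg hh, ih (x+1), ih (0+1)]; ring

-- A's value in closed form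
lemma keyA (l : List String) :
    l.foldl (fun x i => if i == "X--" || i == "--X" then x - 1 else x + 1) 0
      = (l.length : Int) - 2 * ((l.filter (fun op => op == "X--" || op == "--X")).length : Int) := by
  induction l with
  | nil => simp
  | cons h t ih =>
    simp only [List.foldl_cons, List.filter_cons, List.length_cons]
    by_cases hh : (h == "X--" || h == "--X") = true
    · rw [foldA_shift, ih]; simp [hh]; ring
    · rw [foldA_shift, ih]; simp [hh]; ring

-- PySem's first-occurrence dedup is a permutation of Mathlib's dedup
lemma perm_dedup (l : List String) : (PySem.List.dedup l).Perm l.dedup :=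
  (List.perm_ext_iff_of_nodup (PySem.List.nodup_dedup l) l.nodup_dedup).2
    (fun a => by simp [List.mem_dedup])

-- signed sum over any key list splits into total sum minus twice the decrement part
lemma sum_signed (l ks : List String) :
    (ks.map (fun k => if k == "X--" || k == "--X" then -(l.count k : Int) else (l.count k : Int))).sum
      = (ks.map (fun k => (l.count k : Int))).sum
        - 2 * ((ks.filter (fun k => k == "X--" || k == "--X")).map (fun k => (l.count k : Int))).sum := by
  induction ks with
  | nil => simp
  | cons h t ih =>
    simp only [List.map_cons, List.sum_cons, List.filter_cons]
    by_cases hh : (h == "X--" || h == "--X") = true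
    · rw [if_pos hh, if_pos hh, ih]; simp; ring
    · rw [if_neg hh, if_neg hh, ih]; ring

-- the counts over the distinct keys add up to the length
lemma sum_counts (l : List String) :
    ((PySem.List.dedup l).map (fun k => (l.count k : Int))).sum = (l.length : Int) := by
  rw [((perm_dedup l).map (fun k => (l.count k : Int))).sum_eq]
  have h := List.sum_map_count_dedup_eq_length l
  calc (l.dedup.map (fun k => (l.count k : Int))).sum
      = (((l.dedup.map (fun k => l.count k)).map (fun n : Nat => (n : Int)))).sum := by
        rw [List.map_map]; rfl
    _ = (((l.dedup.map (fun k => l.count k)).sum : Nat) : Int) := by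
        rw [Nat.cast_list_sum]
    _ = (l.length : Int) := by rw [h]

-- the counts over the distinct decrement keys add up to the filtered length
lemma sum_counts_filter (l : List String) :
    (((PySem.List.dedup l).filter (fun k => k == "X--" || k == "--X")).map
        (fun k => (l.count k : Int))).sum
      = ((l.filter (fun op => op == "X--" || op == "--X")).length : Int) := by
  rw [(((perm_dedup l).filter _).map (fun k => (l.count k : Int))).sum_eq]
  have h := List.sum_map_count_dedup_filter_eq_countP (fun k => k == "X--" || k == "--X") l
  calc ((l.dedup.filter (fun k => k == "X--" || k == "--X")).map (fun k => (l.count k : Int))).sum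
      = (((l.dedup.filter (fun k => k == "X--" || k == "--X")).map (fun k => l.count k)).map
          (fun n : Nat => (n : Int))).sum := by rw [List.map_map]; rfl
    _ = ((((l.dedup.filter (fun k => k == "X--" || k == "--X")).map (fun k => l.count k)).sum : Nat) : Int) := by
        rw [Nat.cast_list_sum]
    _ = ((l.countP (fun k => k == "X--" || k == "--X") : Nat) : Int) := by rw [h]
    _ = ((l.filter (fun op => op == "X--" || op == "--X")).length : Int) := by
        rw [List.countP_eq_length_filter]

-- ===== VERDICT (by name: the statement is the Claim_ definition above) =====
theorem solution_1374_4_spec : Claim_equal_solution_1374_4 := by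
  intro ops _
  unfold Spec_solution_1374_4 solution_1374_4 solution_1374_4_alt
  rw [keyA]
  show ((ops.length : Int) - 2 * ((ops.filter (fun op => op == "X--" || op == "--X")).length : Int))
      = ((ops.foldl (fun d op => d.insert op (d.getD op 0 + 1)) PySem.Dict.empty).items).foldl
          (fun total p => total + (if p.1 == "X--" || p.1 == "--X" then -p.2 else p.2)) 0
  rw [PySem.Dict.foldl_insert_getD_add_one_eq_counter, PySem.Dict.items_counter,
    PySem.List.foldl_add, List.map_map, ← PySem.List.dedup_eq_ofList]
  simp only [Function.comp_def]
  rw [sum_signed ops (PySem.List.dedup ops), sum_counts, sum_counts_filter]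
  ring
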